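-- pv_equiv track=rewrite | github.com/dsweet99/dryer | tests/benchmark_data/module_014.py | compute_14_1
-- ===== SOURCE A (Python) =====
-- def compute_14_1(a, b, c):
--     x = a * 242 + b * 191
--     y = c * 162 - a * 113
--     for i in range(20):
--         x = x + i * 44
--         y = y - i * 17
--         if x > 6410:
--             x = x % 1705
--     return x + y + 15
-- ===== SOURCE B (Python) =====
-- def compute_14_1(a, b, c):
--     # Event-jumping: y in closed form; x advanced between mod events in closed
--     # form, with a binary search locating the next threshold crossing.
--     # P(k) = sum of 44*t for t in range(k+1) = 22*k*(k+1)
--     def P(k):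
--         return 22 * k * (k + 1)
--     x = a * 242 + b * 191
--     i = 0
--     while i < 20:
--         v = x - P(i - 1)          # value after step j (if no mod up to j) is v + P(j)
--         if v + P(19) <= 6410:     # no mod event remains: jump to the end
--             x = v + P(19)
--             break
--         lo, hi = i, 19            # binary search: first j >= i with v + P(j) > 6410
--         while lo < hi:
--             mid = (lo + hi) // 2
--             if v + P(mid) > 6410:
--                 hi = mid
--             else:
--                 lo = mid + 1
--         x = (v + P(lo)) % 1705    # the mod fires exactly at step lo
--         i = lo + 1
--     return x + (c * 162 - a * 113 - 3230) + 15
-- ===== Notes on version B (the rewrite author's own statement) =====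
-- stated objective: alternative
-- what changed: Replaces the 20-step twofold simulation by event jumping: y is the closed form c*162 - a*113 - 3230, and x is advanced between mod events in closed form via prefix sums P(k)=22k(k+1), with a binary search locating the next threshold crossing; the loop runs once per mod event (at most a handful) instead of 20 fixed steps.
import Mathlib
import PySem

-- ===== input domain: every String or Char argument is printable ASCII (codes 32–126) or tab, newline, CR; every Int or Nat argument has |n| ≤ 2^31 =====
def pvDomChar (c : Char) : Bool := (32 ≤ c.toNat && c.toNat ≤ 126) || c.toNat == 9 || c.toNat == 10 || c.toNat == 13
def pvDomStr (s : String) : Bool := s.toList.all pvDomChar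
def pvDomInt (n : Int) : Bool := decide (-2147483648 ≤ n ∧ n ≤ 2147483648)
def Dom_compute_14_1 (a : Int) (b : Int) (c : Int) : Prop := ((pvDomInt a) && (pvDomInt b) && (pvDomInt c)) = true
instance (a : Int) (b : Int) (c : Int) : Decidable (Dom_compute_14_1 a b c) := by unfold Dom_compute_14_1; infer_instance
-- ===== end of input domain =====

-- B replaces A's fixed 20-step twofold simulation by a closed-form y plus event
-- jumping on x (prefix sums + binary search for the next threshold crossing);
-- objective: alternative algorithm, same result.

-- ===== PORT A =====
def compute_14_1 (a : Int) (b : Int) (c : Int) : Int :=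
  let x := a * 242 + b * 191
  let y := c * 162 - a * 113
  let p := (PySem.List.pyRange 0 20 1).foldl
    (fun (p : Int × Int) i =>
      let x := p.1 + i * 44
      let y := p.2 - i * 17
      let x := if x > 6410 then PySem.Int.mod x 1705 else x
      (x, y)) (x, y)
  p.1 + p.2 + 15

-- ===== PORT B =====
-- P(k) = sum of 44*t for t in range(k+1) = 22*k*(k+1)
def pvP (k : Int) : Int := 22 * k * (k + 1)

-- B's inner `while lo < hi` binary search, transcribed
def pvBsearch (v : Int) (lo hi : Nat) : Nat :=
  if _h : lo < hi then
    if v + pvP (((lo + hi) / 2 : Nat) : Int) > 6410 then pvBsearch v lo ((lo + hi) / 2)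
    else pvBsearch v ((lo + hi) / 2 + 1) hi
  else lo
termination_by hi - lo
decreasing_by all_goals omega

-- B's outer `while i < 20` loop; i strictly increases each pass, so fuel 20 is exact
def pvGo : Nat → Nat → Int → Int
  | 0, _, x => x
  | fuel + 1, i, x =>
    if i < 20 then
      let v := x - pvP ((i : Int) - 1)
      if v + pvP 19 ≤ 6410 then v + pvP 19
      else
        let lo := pvBsearch v i 19
        pvGo fuel (lo + 1) (PySem.Int.mod (v + pvP (lo : Int)) 1705)
    else x

def compute_14_1_alt (a : Int) (b : Int) (c : Int) : Int :=
  pvGo 20 0 (a * 242 + b * 191) + (c * 162 - a * 113 - 3230) + 15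

-- ===== PRECONDITION & SPEC =====
def Spec_compute_14_1 (a : Int) (b : Int) (c : Int) (out : Int) : Prop := out = compute_14_1_alt a b c
instance (a : Int) (b : Int) (c : Int) (out : Int) : Decidable (Spec_compute_14_1 a b c out) := by unfold Spec_compute_14_1; infer_instance

-- ===== CLAIM (what is proved, stated in full; the proofs are below) =====
def Claim_equal_compute_14_1 : Prop := ∀ (a : Int) (b : Int) (c : Int), Dom_compute_14_1 a b c → Spec_compute_14_1 a b c (compute_14_1 a b c)

-- ===== LEMMAS AND PROOFS =====

-- one step of A's x-accumulation
def stepA (x i : Int) : Int :=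
  let x := x + i * 44
  if x > 6410 then PySem.Int.mod x 1705 else x

-- A's x-accumulation over steps i, i+1, …, i+n-1
def runSeg (i n : Nat) (x : Int) : Int :=
  (List.range' i n).foldl (fun x j => stepA x (j : Int)) x

-- A's paired fold splits: y is independent of x
theorem pv_fold_split (l : List Int) (x y : Int) :
    (l.foldl (fun (p : Int × Int) i =>
        let x := p.1 + i * 44
        let y := p.2 - i * 17
        let x := if x > 6410 then PySem.Int.mod x 1705 else x
        (x, y)) (x, y))
    = (l.foldl stepA x, y - 17 * l.sum) := by
  induction l generalizing x y with
  | nil => simp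
  | cons h t ih =>
      rw [List.foldl_cons, List.foldl_cons, ih, List.sum_cons]
      refine Prod.ext ?_ ?_
      · simp [stepA]
      · simp; ring

theorem pyRange_eq : PySem.List.pyRange 0 20 1 = List.map (fun j : Nat => (j : Int)) (List.range' 0 20) := by
  decide

theorem runSeg_cons (i n : Nat) (x : Int) :
    runSeg i (n + 1) x = runSeg (i + 1) n (stepA x i) := by
  simp [runSeg, List.range']

theorem seg_split (m : Nat) : ∀ (i n : Nat) (x : Int),
    runSeg i (m + n) x = runSeg (i + m) n (runSeg i m x) := by
  induction m with
  | zero => intro i n x; simp [runSeg]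
  | succ m ih =>
      intro i n x
      have h1 : m + 1 + n = (m + n) + 1 := by omega
      rw [h1, runSeg_cons, runSeg_cons, ih]
      have h2 : i + 1 + m = i + (m + 1) := by omega
      rw [h2]

theorem pvP_succ (j : Nat) : pvP (j : Int) = pvP ((j : Int) - 1) + (j : Int) * 44 := by
  unfold pvP; ring

theorem pvP_mono (s t : Nat) (h : s ≤ t) : pvP (s : Int) ≤ pvP (t : Int) := by
  unfold pvP
  have hs : (0 : Int) ≤ (s : Int) := Int.natCast_nonneg s
  have hst : (s : Int) ≤ (t : Int) := by exact_mod_cast h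
  nlinarith

-- a segment on which the threshold is never exceeded adds the prefix-sum difference
theorem nomod (n : Nat) : ∀ (i : Nat) (v : Int),
    (∀ j : Nat, i ≤ j → j < i + n → v + pvP (j : Int) ≤ 6410) →
    runSeg i n (v + pvP ((i : Int) - 1)) = v + pvP ((i : Int) + n - 1) := by
  induction n with
  | zero =>
      intro i v _
      have h0 : ((i : Int) + (0 : Nat) - 1) = (i : Int) - 1 := by push_cast; ring
      rw [h0]
      simp [runSeg]
  | succ n ih =>
      intro i v h
      rw [runSeg_cons]
      have hi : v + pvP (i : Int) ≤ 6410 := h i le_rfl (by omega)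
      have hadd : v + pvP ((i : Int) - 1) + (i : Int) * 44 = v + pvP (i : Int) := by
        rw [pvP_succ]; ring
      have hstep : stepA (v + pvP ((i : Int) - 1)) i = v + pvP (i : Int) := by
        simp only [stepA]
        rw [hadd, if_neg (by omega : ¬ v + pvP (i : Int) > 6410)]
      rw [hstep]
      have hc1 : ((i + 1 : Nat) : Int) - 1 = (i : Int) := by push_cast; ring
      have := ih (i + 1) v (fun j hj1 hj2 => h j (by omega) (by omega))
      rw [hc1] at this
      rw [this]
      have hc2 : ((i + 1 : Nat) : Int) + (n : Nat) - 1 = (i : Int) + ((n + 1 : Nat) : Int) - 1 := by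
        push_cast; ring
      rw [hc2]

-- binary search returns the first index in [lo, hi] past the threshold
theorem bsearch_spec (v : Int) : ∀ (d lo hi : Nat), hi - lo ≤ d → lo ≤ hi →
    v + pvP (hi : Int) > 6410 →
    lo ≤ pvBsearch v lo hi ∧ pvBsearch v lo hi ≤ hi ∧
    v + pvP ((pvBsearch v lo hi : Nat) : Int) > 6410 ∧
    (∀ t : Nat, lo ≤ t → t < pvBsearch v lo hi → v + pvP (t : Int) ≤ 6410) := by
  intro d
  induction d with
  | zero =>
      intro lo hi hd hle hhi
      have heq : lo = hi := by omega
      subst heq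
      unfold pvBsearch
      rw [dif_neg (by omega : ¬ lo < lo)]
      exact ⟨le_rfl, le_rfl, hhi, fun t h1 h2 => by omega⟩
  | succ d ih =>
      intro lo hi hd hle hhi
      by_cases h : lo < hi
      · unfold pvBsearch
        rw [dif_pos h]
        set mid := (lo + hi) / 2 with hmid
        have hm1 : lo ≤ mid := by omega
        have hm2 : mid < hi := by omega
        by_cases hp : v + pvP ((mid : Nat) : Int) > 6410
        · rw [if_pos hp]
          obtain ⟨h1, h2, h3, h4⟩ := ih lo mid (by omega) hm1 hp
          exact ⟨h1, by omega, h3, h4⟩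
        · rw [if_neg hp]
          obtain ⟨h1, h2, h3, h4⟩ := ih (mid + 1) hi (by omega) (by omega) hhi
          refine ⟨by omega, h2, h3, ?_⟩
          intro t ht1 ht2
          by_cases htm : t ≤ mid
          · have := pvP_mono t mid htm
            omega
          · exact h4 t (by omega) ht2
      · have heq : lo = hi := by omega
        subst heq
        unfold pvBsearch
        rw [dif_neg (by omega : ¬ lo < lo)]
        exact ⟨le_rfl, le_rfl, hhi, fun t h1 h2 => by omega⟩

-- B's outer loop computes A's x-accumulation for the remaining steps
theorem pvGo_eq_runSeg : ∀ (fuel i : Nat) (x : Int), 20 ≤ fuel + i →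
    pvGo fuel i x = runSeg i (20 - i) x := by
  intro fuel
  induction fuel with
  | zero =>
      intro i x h
      have h0 : 20 - i = 0 := by omega
      rw [h0]
      simp [pvGo, runSeg]
  | succ fuel ih =>
      intro i x h
      by_cases hi : i < 20
      · simp only [pvGo, if_pos hi]
        set v := x - pvP ((i : Int) - 1) with hv
        have hx : x = v + pvP ((i : Int) - 1) := by rw [hv]; ring
        have h19 : pvP ((19 : Nat) : Int) = pvP 19 := by norm_num
        by_cases hle : v + pvP 19 ≤ 6410
        · rw [if_pos hle]
          have hall : ∀ j : Nat, i ≤ j → j < i + (20 - i) → v + pvP (j : Int) ≤ 6410 := by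
            intro j _ hj2
            have := pvP_mono j 19 (by omega)
            rw [h19] at this
            omega
          have hn := nomod (20 - i) i v hall
          have harg : (i : Int) + ((20 - i : Nat) : Int) - 1 = 19 := by
            push_cast [Nat.cast_sub (by omega : i ≤ 20)]
            ring
          rw [harg] at hn
          rw [hx, hn]
        · rw [if_neg hle]
          have hgt : v + pvP ((19 : Nat) : Int) > 6410 := by
            rw [h19]; omega
          obtain ⟨hb1, hb2, hb3, hb4⟩ := bsearch_spec v 19 i 19 (by omega) (by omega) hgt
          set lo := pvBsearch v i 19 with hlo
          have hsplit : 20 - i = (lo - i + 1) + (20 - (lo + 1)) := by omega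
          rw [hx, hsplit, seg_split]
          have hseg : runSeg i (lo - i) (v + pvP ((i : Int) - 1)) = v + pvP ((lo : Int) - 1) := by
            have hall : ∀ j : Nat, i ≤ j → j < i + (lo - i) → v + pvP (j : Int) ≤ 6410 := by
              intro j hj1 hj2
              exact hb4 j hj1 (by omega)
            have hn := nomod (lo - i) i v hall
            have harg : (i : Int) + ((lo - i : Nat) : Int) - 1 = (lo : Int) - 1 := by
              push_cast [Nat.cast_sub (by omega : i ≤ lo)]
              ring
            rw [harg] at hn
            exact hn
          have hadd : v + pvP ((lo : Int) - 1) + (lo : Int) * 44 = v + pvP (lo : Int) := by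
            rw [pvP_succ]; ring
          have hfirst : runSeg i (lo - i + 1) (v + pvP ((i : Int) - 1))
              = PySem.Int.mod (v + pvP (lo : Int)) 1705 := by
            calc runSeg i ((lo - i) + 1) (v + pvP ((i : Int) - 1))
                = runSeg (i + (lo - i)) 1 (runSeg i (lo - i) (v + pvP ((i : Int) - 1))) := by
                  rw [← seg_split]
              _ = runSeg lo 1 (v + pvP ((lo : Int) - 1)) := by
                  rw [hseg]
                  congr 1
                  omega
              _ = stepA (v + pvP ((lo : Int) - 1)) lo := by
                  simp [runSeg, List.range']
              _ = PySem.Int.mod (v + pvP (lo : Int)) 1705 := by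
                  simp only [stepA]
                  rw [hadd, if_pos hb3]
          rw [hfirst]
          have hidx : i + (lo - i + 1) = lo + 1 := by omega
          rw [hidx]
          exact ih (lo + 1) _ (by omega)
      · simp only [pvGo, if_neg hi]
        have h0 : 20 - i = 0 := by omega
        rw [h0]
        simp [runSeg]

-- ===== VERDICT (by name: the statement is the Claim_ definition above) =====
theorem compute_14_1_spec : Claim_equal_compute_14_1 := by
  intro a b c _
  unfold Spec_compute_14_1
  simp only [compute_14_1, compute_14_1_alt, pv_fold_split]
  rw [pyRange_eq]
  simp only [List.foldl_map]
  have hsum : (List.map (fun j : Nat => (j : Int)) (List.range' 0 20)).sum = 190 := by decide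
  rw [hsum]
  have hrun : List.foldl (fun x (j : Nat) => stepA x (j : Int)) (a * 242 + b * 191) (List.range' 0 20)
      = pvGo 20 0 (a * 242 + b * 191) :=
    (pvGo_eq_runSeg 20 0 (a * 242 + b * 191) (by omega)).symm
  rw [hrun]
  ring
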